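-- pv_equiv track=rewrite | github.com/Acidni-LLC/terprint-menudownloader | container_app/stock_routes.py | _extract_sub_type
-- ===== SOURCE A (Python) =====
-- def _extract_sub_type(product_name: str, category: str) -> str:
--     """Extract sub-type from product name."""
--     if not product_name:
--         return ""
--     name_lower = product_name.lower()
--
--     # Common sub-types by category
--     sub_types = {
--         "flower": ["whole flower", "ground", "minis", "smalls", "shake", "pre-roll", "pre-ground", "popcorn"],
--         "concentrates": ["live rosin", "live resin", "shatter", "wax", "budder", "crumble", "diamonds", "sauce", "badder", "batter", "hash", "rosin", "distillate"],
--         "vapes": ["cart", "cartridge", "disposable", "pod", "510"],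
--         "edibles": ["gummies", "chocolate", "candy", "capsule", "tincture", "rso"],
--     }
--
--     cat_lower = category.lower() if category else ""
--
--     # Check category-specific sub-types first
--     for cat, types in sub_types.items():
--         if cat in cat_lower or cat in name_lower:
--             for sub in types:
--                 if sub in name_lower:
--                     return sub.title()
--
--     # General search
--     for types in sub_types.values():
--         for sub in types:
--             if sub in name_lower:
--                 return sub.title()
--
--     return ""
-- ===== SOURCE B (Python) =====
-- def _extract_sub_type(product_name: str, category: str) -> str:
--     """Extract sub-type from product name."""
--     if not product_name:
--         return ""
--     name_lower = product_name.lower()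
--
--     sub_types = {
--         "flower": ["whole flower", "ground", "minis", "smalls", "shake", "pre-roll", "pre-ground", "popcorn"],
--         "concentrates": ["live rosin", "live resin", "shatter", "wax", "budder", "crumble", "diamonds", "sauce", "badder", "batter", "hash", "rosin", "distillate"],
--         "vapes": ["cart", "cartridge", "disposable", "pod", "510"],
--         "edibles": ["gummies", "chocolate", "candy", "capsule", "tincture", "rso"],
--     }
--
--     cat_lower = category.lower() if category else ""
--
--     # Single pass with two accumulators: find each category's first keyword hit
--     # once, remembering the first hit overall (gen) and the first hit in a
--     # category whose key matches (spec); no second fallback pass and no early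
--     # return are needed.
--     spec = gen = None
--     for cat, types in sub_types.items():
--         hit = next((s for s in types if s in name_lower), None)
--         if hit is None:
--             continue
--         if gen is None:
--             gen = hit
--         if spec is None and (cat in cat_lower or cat in name_lower):
--             spec = hit
--
--     r = spec if spec is not None else gen
--     return r.title() if r is not None else ""
-- ===== Notes on version B (the rewrite author's own statement) =====
-- stated objective: alternative
-- what changed: Replaces A's two staged search passes with early returns by a single pass over the category table that keeps two accumulators (first hit in a matching category, first hit overall), tests each keyword at most once, and combines the accumulators at the end.
import Mathlib
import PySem

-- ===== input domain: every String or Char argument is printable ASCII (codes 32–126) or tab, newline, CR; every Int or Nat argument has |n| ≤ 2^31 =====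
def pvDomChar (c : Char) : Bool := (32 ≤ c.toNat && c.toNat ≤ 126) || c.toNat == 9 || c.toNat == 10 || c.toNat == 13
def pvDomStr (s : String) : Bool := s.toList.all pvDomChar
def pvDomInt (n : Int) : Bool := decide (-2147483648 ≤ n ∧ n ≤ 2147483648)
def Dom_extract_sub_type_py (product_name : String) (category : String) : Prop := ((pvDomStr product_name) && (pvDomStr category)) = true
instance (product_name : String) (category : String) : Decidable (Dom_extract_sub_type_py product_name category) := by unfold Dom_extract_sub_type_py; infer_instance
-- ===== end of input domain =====

-- ===== PORT A =====
-- B replaces A's two staged passes by one pass with two accumulators; same results, same cost.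

-- shared data/helpers: the literal sub_types table and Python's str.title()
-- (exact on the ASCII domain: a letter is uppercased iff the previous char is not a letter)
def pvSubTypes : List (String × List String) :=
  [("flower", ["whole flower", "ground", "minis", "smalls", "shake", "pre-roll", "pre-ground", "popcorn"]),
   ("concentrates", ["live rosin", "live resin", "shatter", "wax", "budder", "crumble", "diamonds", "sauce", "badder", "batter", "hash", "rosin", "distillate"]),
   ("vapes", ["cart", "cartridge", "disposable", "pod", "510"]),
   ("edibles", ["gummies", "chocolate", "candy", "capsule", "tincture", "rso"])]

def pvTitleGo : Bool → List Char → List Char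
  | _, [] => []
  | prevAlpha, c :: rest =>
    (if prevAlpha then c.toLower else c.toUpper) :: pvTitleGo c.isAlpha rest

def pvTitle (s : String) : String := String.ofList (pvTitleGo false s.toList)

-- for sub in types: if sub in name_lower: return sub  (inner loop of both passes of A)
def pvFindSub (nameLower : String) : List String → Option String
  | [] => none
  | sub :: rest =>
    if PySem.Str.isIn sub nameLower then some sub else pvFindSub nameLower rest

-- first pass: for cat, types in sub_types.items(): if cat in cat_lower or cat in name_lower: …
def pvCatPass (nameLower catLower : String) : List (String × List String) → Option String
  | [] => none
  | (cat, types) :: rest =>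
    if PySem.Str.isIn cat catLower || PySem.Str.isIn cat nameLower then
      match pvFindSub nameLower types with
      | some s => some s
      | none => pvCatPass nameLower catLower rest
    else pvCatPass nameLower catLower rest

-- second pass: for types in sub_types.values(): …
def pvGeneralPass (nameLower : String) : List (List String) → Option String
  | [] => none
  | types :: rest =>
    match pvFindSub nameLower types with
    | some s => some s
    | none => pvGeneralPass nameLower rest

def extract_sub_type_py (product_name : String) (category : String) : String :=
  if product_name = "" then ""
  else
    let nameLower := PySem.Str.lower product_name
    let catLower := if category = "" then "" else PySem.Str.lower category
    match pvCatPass nameLower catLower pvSubTypes with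
    | some s => pvTitle s
    | none =>
      match pvGeneralPass nameLower (pvSubTypes.map Prod.snd) with
      | some s => pvTitle s
      | none => ""

-- ===== PORT B =====
-- B's single loop: state (spec, gen); 'hit = next((s for s in types if s in name_lower), None)'
-- is the library find?, then the two accumulator updates of Source B.
def pvScan (nameLower catLower : String) :
    List (String × List String) → Option String × Option String → Option String × Option String
  | [], acc => acc
  | (cat, types) :: rest, (spec, gen) =>
    match types.find? (fun s => PySem.Str.isIn s nameLower) with
    | none => pvScan nameLower catLower rest (spec, gen)
    | some hit =>
      let gen' := if gen.isNone then some hit else gen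
      let spec' :=
        if spec.isNone && (PySem.Str.isIn cat catLower || PySem.Str.isIn cat nameLower)
        then some hit else spec
      pvScan nameLower catLower rest (spec', gen')

def extract_sub_type_py_alt (product_name : String) (category : String) : String :=
  if product_name = "" then ""
  else
    let nameLower := PySem.Str.lower product_name
    let catLower := if category = "" then "" else PySem.Str.lower category
    let sg := pvScan nameLower catLower pvSubTypes (none, none)
    let r := match sg.1 with | some s => some s | none => sg.2
    match r with
    | some s => pvTitle s
    | none => ""

-- ===== PRECONDITION & SPEC =====
def Spec_extract_sub_type_py (product_name : String) (category : String) (out : String) : Prop := out = extract_sub_type_py_alt product_name category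
instance (product_name : String) (category : String) (out : String) : Decidable (Spec_extract_sub_type_py product_name category out) := by unfold Spec_extract_sub_type_py; infer_instance

-- ===== CLAIM (what is proved, stated in full; the proofs are below) =====
def Claim_equal_extract_sub_type_py : Prop := ∀ (product_name : String) (category : String), Dom_extract_sub_type_py product_name category → Spec_extract_sub_type_py product_name category (extract_sub_type_py product_name category)

-- ===== LEMMAS AND PROOFS =====
theorem pvFindSub_eq_find? (nl : String) (l : List String) :
    pvFindSub nl l = l.find? (fun s => PySem.Str.isIn s nl) := by
  induction l with
  | nil => rfl
  | cons a t ih =>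
    simp only [pvFindSub, List.find?_cons, ih]
    cases PySem.Str.isIn a nl <;> rfl

-- the loop invariant of B's single pass: the two accumulators are exactly
-- A's two passes, shadowed by whatever the state already holds
theorem pvScan_eq (nl cl : String) (items : List (String × List String))
    (spec gen : Option String) :
    pvScan nl cl items (spec, gen) =
      (spec.or (pvCatPass nl cl items),
       gen.or (pvGeneralPass nl (items.map Prod.snd))) := by
  induction items generalizing spec gen with
  | nil => simp [pvScan, pvCatPass, pvGeneralPass]
  | cons a t ih =>
    obtain ⟨cat, types⟩ := a
    simp only [pvScan, List.map_cons, pvCatPass, pvGeneralPass, pvFindSub_eq_find?]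
    cases hf : types.find? (fun s => PySem.Str.isIn s nl) with
    | none =>
      rw [ih]
      cases PySem.Str.isIn cat cl || PySem.Str.isIn cat nl <;> simp
    | some hit =>
      cases hm : PySem.Str.isIn cat cl || PySem.Str.isIn cat nl <;>
        cases spec <;> cases gen <;> simp [ih, Option.or]

-- ===== VERDICT (by name: the statement is the Claim_ definition above) =====
theorem extract_sub_type_py_spec : Claim_equal_extract_sub_type_py := by
  intro product_name category _
  unfold Spec_extract_sub_type_py extract_sub_type_py extract_sub_type_py_alt
  by_cases hpn : product_name = ""
  · rw [hpn]; rfl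
  · rw [if_neg hpn, if_neg hpn]
    simp only [pvScan_eq, Option.none_or]
    cases pvCatPass (PySem.Str.lower product_name)
        (if category = "" then "" else PySem.Str.lower category) pvSubTypes <;> rfl
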